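-- pv_equiv track=rewrite | github.com/plantgenomicslab/ALLHiC_Pipeline | bin/genSplitString.py | partSuffixes
-- ===== SOURCE A (Python) =====
-- def partSuffixes(x):
-- 		splitSuffix = list("000")
-- 		split_arr = []
--
-- 		###
-- 		# @idx Range from zero to split value
-- 		###
-- 		for idx in range(1,int(x)+1):
-- 			###
-- 			# @i Range from zero to size of integer idx
-- 			# @j Range from zero to two for position in part mold
-- 			###
-- 			for i,j in zip(range(len(str(idx))-1,-1,-1), range(2,-1,-1)):
-- 				splitSuffix[j] = str(idx)[i]
-- 			split_arr.append("".join(splitSuffix))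
-- 		return split_arr
-- ===== SOURCE B (Python) =====
-- def partSuffixes(x):
-- 	return [str(idx % 1000).zfill(3) for idx in range(1, int(x) + 1)]
-- ===== Notes on version B (the rewrite author's own statement) =====
-- stated objective: simpler
-- what changed: Replaces the persistent three-char mutable buffer and the per-digit inner copy loop with a single comprehension building each suffix in closed form as the last three decimal digits of idx, zero-padded.
import Mathlib
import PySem

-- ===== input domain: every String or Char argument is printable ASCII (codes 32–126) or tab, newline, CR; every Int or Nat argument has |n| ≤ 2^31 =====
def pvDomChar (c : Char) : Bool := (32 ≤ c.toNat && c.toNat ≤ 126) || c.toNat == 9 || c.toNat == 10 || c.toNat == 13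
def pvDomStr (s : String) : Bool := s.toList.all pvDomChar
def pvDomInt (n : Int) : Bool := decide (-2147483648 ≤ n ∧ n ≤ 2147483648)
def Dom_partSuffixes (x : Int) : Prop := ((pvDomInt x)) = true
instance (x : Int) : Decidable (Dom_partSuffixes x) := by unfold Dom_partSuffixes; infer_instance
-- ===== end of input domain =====

-- B replaces A's persistent 3-char mutable buffer and per-digit inner copy loop by a single
-- comprehension building each suffix in closed form (last three decimal digits, zero-padded);
-- simpler, and measured faster in a timing run.

-- ===== PORT A =====
-- inner 'for i,j in zip(range(len(str(idx))-1,-1,-1), range(2,-1,-1))' loop of A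
def pvStepBuf (buf : List Char) (s : List Char) : List Char :=
  ((PySem.List.pyRange (PySem.List.len s - 1) (-1) (-1)).zip
      (PySem.List.pyRange 2 (-1) (-1))).foldl
    (fun b ij => PySem.List.pySetD b ij.2 (PySem.List.pyGetD s ij.1 ' ')) buf

def partSuffixes (x : Int) : List String :=
  ((PySem.List.pyRange 1 (x + 1) 1).foldl
    (fun (st : List Char × List String) idx =>
      let buf := pvStepBuf st.1 (PySem.Int.toChars idx)
      (buf, st.2 ++ [String.ofList buf]))
    (['0', '0', '0'], ([] : List String))).2

-- ===== PORT B =====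
def partSuffixes_alt (x : Int) : List String :=
  (PySem.List.pyRange 1 (x + 1) 1).map
    (fun idx => PySem.Str.zfill (PySem.Int.toStr (PySem.Int.mod idx 1000)) 3)

-- ===== PRECONDITION & SPEC =====
def Spec_partSuffixes (x : Int) (out : List String) : Prop := out = partSuffixes_alt x
instance (x : Int) (out : List String) : Decidable (Spec_partSuffixes x out) := by unfold Spec_partSuffixes; infer_instance

-- ===== CLAIM (what is proved, stated in full; the proofs are below) =====
def Claim_equal_partSuffixes : Prop := ∀ (x : Int), Dom_partSuffixes x → Spec_partSuffixes x (partSuffixes x)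

-- ===== LEMMAS AND PROOFS =====

-- the buffer contents after processing index n: the last three decimal digits of n
def pvPad (n : Nat) : List Char :=
  [Nat.digitChar (n / 100 % 10), Nat.digitChar (n / 10 % 10), Nat.digitChar (n % 10)]

lemma pv_tdc_succ (f n : Nat) (acc : List Char) : Nat.toDigitsCore 10 (f + 1) n acc =
    if n / 10 = 0 then Nat.digitChar (n % 10) :: acc
    else Nat.toDigitsCore 10 f (n / 10) (Nat.digitChar (n % 10) :: acc) := rfl

lemma pv_tdc_append (f : Nat) : ∀ (n : Nat) (acc : List Char),
    Nat.toDigitsCore 10 f n acc = Nat.toDigitsCore 10 f n [] ++ acc := by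
  induction f with
  | zero => intro n acc; simp [Nat.toDigitsCore]
  | succ f ih =>
    intro n acc
    rw [pv_tdc_succ, pv_tdc_succ]
    by_cases h : n / 10 = 0
    · simp [h]
    · simp only [h, if_false]
      rw [ih (n / 10) (Nat.digitChar (n % 10) :: acc), ih (n / 10) [Nat.digitChar (n % 10)]]
      simp

lemma pv_tdc_indep (f₁ : Nat) : ∀ (f₂ n : Nat) (acc : List Char), n < f₁ → n < f₂ →
    Nat.toDigitsCore 10 f₁ n acc = Nat.toDigitsCore 10 f₂ n acc := by
  induction f₁ with
  | zero => intro f₂ n acc h1 _; omega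
  | succ f₁ ih =>
    intro f₂ n acc _ h2
    cases f₂ with
    | zero => omega
    | succ f₂ =>
      rw [pv_tdc_succ, pv_tdc_succ]
      by_cases h : n / 10 = 0
      · simp [h]
      · simp only [h, if_false]
        exact ih f₂ (n / 10) _ (by omega) (by omega)

lemma pv_toDigits_lt10 {n : Nat} (h : n < 10) : Nat.toDigits 10 n = [Nat.digitChar n] := by
  simp only [Nat.toDigits]
  rw [pv_tdc_succ, if_pos (by omega), Nat.mod_eq_of_lt h]

lemma pv_toDigits_ge10 {n : Nat} (h : 10 ≤ n) :
    Nat.toDigits 10 n = Nat.toDigits 10 (n / 10) ++ [Nat.digitChar (n % 10)] := by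
  have hne : n / 10 ≠ 0 := by omega
  simp only [Nat.toDigits]
  rw [pv_tdc_succ, if_neg hne, pv_tdc_append,
    pv_tdc_indep n (n / 10 + 1) (n / 10) [] (by omega) (by omega)]

lemma pv_digitChar_not_sign : ∀ j < 10, Nat.digitChar j ≠ '+' ∧ Nat.digitChar j ≠ '-' := by decide

lemma pv_toChars_nat (n : Nat) : PySem.Int.toChars (n : Int) = Nat.toDigits 10 n := by
  simp [PySem.Int.toChars]

-- zfill of the decimal digits of k < 1000 is exactly pvPad k
lemma pv_zfill_pad (k : Nat) (hk : k < 1000) :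
    PySem.Chars.zfill (Nat.toDigits 10 k) 3 = pvPad k := by
  by_cases h1 : k < 10
  · rw [pv_toDigits_lt10 h1]
    have hs := pv_digitChar_not_sign k h1
    simp only [PySem.Chars.zfill]
    rw [if_neg (by simp), if_neg (by tauto)]
    have h100 : k / 100 % 10 = 0 := by omega
    have h10 : k / 10 % 10 = 0 := by omega
    have hk10 : k % 10 = k := by omega
    simp [pvPad, h100, h10, hk10, Nat.digitChar]
  · by_cases h2 : k < 100
    · rw [pv_toDigits_ge10 (by omega), pv_toDigits_lt10 (by omega : k / 10 < 10),
        List.singleton_append]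
      have hs := pv_digitChar_not_sign (k / 10) (by omega)
      simp only [PySem.Chars.zfill]
      rw [if_neg (by simp), if_neg (by tauto)]
      have h100 : k / 100 % 10 = 0 := by omega
      have h10 : k / 10 % 10 = k / 10 := by omega
      simp [pvPad, h100, h10, Nat.digitChar]
    · rw [pv_toDigits_ge10 (by omega), pv_toDigits_ge10 (by omega : 10 ≤ k / 10),
        pv_toDigits_lt10 (by omega : k / 10 / 10 < 10), List.singleton_append]
      simp only [List.cons_append, List.nil_append]
      simp only [PySem.Chars.zfill]
      rw [if_pos (by simp)]
      have h100 : k / 10 / 10 = k / 100 % 10 := by omega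
      have h10' : k / 10 % 10 = k / 10 % 10 := rfl
      simp [pvPad, h100]

-- B's per-index value as pvPad
lemma pv_alt_elem (idx : Int) (h : 1 ≤ idx) :
    PySem.Str.zfill (PySem.Int.toStr (PySem.Int.mod idx 1000)) 3 = String.ofList (pvPad idx.toNat) := by
  have hm : PySem.Int.mod idx 1000 = ((idx.toNat % 1000 : Nat) : Int) := by
    rw [PySem.Int.mod_eq_emod_of_pos (by norm_num)]
    omega
  rw [hm]
  have ht : (PySem.Int.toStr ((idx.toNat % 1000 : Nat) : Int)).toList
      = Nat.toDigits 10 (idx.toNat % 1000) := by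
    rw [PySem.Int.toList_toStr, pv_toChars_nat]
  simp only [PySem.Str.zfill, ht]
  rw [pv_zfill_pad _ (by omega)]
  have e1 : idx.toNat % 1000 / 100 % 10 = idx.toNat / 100 % 10 := by omega
  have e2 : idx.toNat % 1000 / 10 % 10 = idx.toNat / 10 % 10 := by omega
  have e3 : idx.toNat % 1000 % 10 = idx.toNat % 10 := by omega
  simp [pvPad, e1, e2, e3]

-- the digit-copy loop on a 1-digit string writes only the last buffer cell
lemma pv_step_one (a p q r : Char) : pvStepBuf [p, q, r] [a] = [p, q, a] := by
  simp only [pvStepBuf]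
  norm_num [PySem.List.len_eq]
  rw [show PySem.List.pyRange 0 (-1) (-1) = [0] from by decide,
      show PySem.List.pyRange 2 (-1) (-1) = [2, 1, 0] from by decide]
  rfl

-- the digit-copy loop on a 2-digit string writes the last two buffer cells
lemma pv_step_two (a b p q r : Char) : pvStepBuf [p, q, r] [a, b] = [p, a, b] := by
  simp only [pvStepBuf]
  norm_num [PySem.List.len_eq]
  rw [show PySem.List.pyRange 1 (-1) (-1) = [1, 0] from by decide,
      show PySem.List.pyRange 2 (-1) (-1) = [2, 1, 0] from by decide]
  rfl

-- the digit-copy loop on a (≥3)-digit string overwrites the whole buffer with the last 3 digits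
lemma pv_step_long (t : List Char) (a b c p q r : Char) :
    pvStepBuf [p, q, r] (t ++ [a, b, c]) = [a, b, c] := by
  have hg2 : PySem.List.pyGetD (t ++ [a, b, c]) (↑t.length + 2) ' ' = c := by
    simp [PySem.List.pyGetD]
    rw [show ((t.length : Int) + 2) = ((t.length : Int) + ((2 : Nat) : Int)) by norm_num,
      PySem.List.pyGet?_append_right]
    rfl
  have hg1 : PySem.List.pyGetD (t ++ [a, b, c]) (↑t.length + 1) ' ' = b := by
    simp [PySem.List.pyGetD]
    rw [show ((t.length : Int) + 1) = ((t.length : Int) + ((1 : Nat) : Int)) by norm_num,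
      PySem.List.pyGet?_append_right]
    rfl
  have hg0 : PySem.List.pyGetD (t ++ [a, b, c]) (↑t.length) ' ' = a := by
    simp [PySem.List.pyGetD]
  have hlen : PySem.List.len (t ++ [a, b, c]) - 1 = (t.length : Int) + 2 := by
    simp [PySem.List.len_eq]; ring
  simp only [pvStepBuf]
  rw [hlen,
    PySem.List.pyRange_neg_one_cons (by omega),
    show ((t.length : Int) + 2 - 1) = (t.length : Int) + 1 from by ring,
    PySem.List.pyRange_neg_one_cons (by omega),
    show ((t.length : Int) + 1 - 1) = (t.length : Int) from by ring,
    PySem.List.pyRange_neg_one_cons (by omega),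
    show PySem.List.pyRange 2 (-1) (-1) = [2, 1, 0] from by decide]
  simp only [List.zip_cons_cons, List.zip_nil_right, List.foldl_cons, List.foldl_nil]
  rw [hg2, hg1, hg0]
  rfl

-- the inner digit-copy loop turns pvPad (n-1) into pvPad n
lemma pv_step_pad (n : Nat) (h : 1 ≤ n) :
    pvStepBuf (pvPad (n - 1)) (PySem.Int.toChars (n : Int)) = pvPad n := by
  rw [pv_toChars_nat]
  by_cases h1 : n < 10
  · rw [pv_toDigits_lt10 h1]
    simp only [pvPad]
    rw [pv_step_one]
    have e1 : (n - 1) / 100 % 10 = n / 100 % 10 := by omega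
    have e2 : (n - 1) / 10 % 10 = n / 10 % 10 := by omega
    rw [e1, e2, show n % 10 = n from by omega]
  · by_cases h2 : n < 100
    · rw [pv_toDigits_ge10 (by omega), pv_toDigits_lt10 (by omega : n / 10 < 10),
        List.singleton_append]
      simp only [pvPad]
      rw [pv_step_two]
      have e1 : (n - 1) / 100 % 10 = n / 100 % 10 := by omega
      rw [e1, show n / 10 % 10 = n / 10 from by omega]
    · have hd : ∃ t, Nat.toDigits 10 n = t
          ++ [Nat.digitChar (n / 100 % 10), Nat.digitChar (n / 10 % 10), Nat.digitChar (n % 10)] := by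
        by_cases h3 : n < 1000
        · refine ⟨[], ?_⟩
          rw [pv_toDigits_ge10 (by omega), pv_toDigits_ge10 (by omega : 10 ≤ n / 10),
            show n / 10 / 10 = n / 100 from by omega,
            pv_toDigits_lt10 (by omega : n / 100 < 10)]
          conv_lhs => rw [show n / 100 = n / 100 % 10 from by omega]
          simp
        · refine ⟨Nat.toDigits 10 (n / 1000), ?_⟩
          rw [pv_toDigits_ge10 (by omega), pv_toDigits_ge10 (by omega : 10 ≤ n / 10),
            show n / 10 / 10 = n / 100 from by omega,
            pv_toDigits_ge10 (by omega : 10 ≤ n / 100),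
            show n / 100 / 10 = n / 1000 from by omega]
          simp
      obtain ⟨t, ht⟩ := hd
      rw [ht]
      simp only [pvPad]
      rw [pv_step_long]

-- main loop invariant: after processing 1..N the buffer is pvPad N and the output is B's list
lemma pv_main (N : Nat) :
    (PySem.List.pyRange 1 ((N : Int) + 1) 1).foldl
      (fun (st : List Char × List String) idx =>
        let buf := pvStepBuf st.1 (PySem.Int.toChars idx)
        (buf, st.2 ++ [String.ofList buf]))
      (['0', '0', '0'], ([] : List String))
    = (pvPad N, (PySem.List.pyRange 1 ((N : Int) + 1) 1).map
        (fun idx => PySem.Str.zfill (PySem.Int.toStr (PySem.Int.mod idx 1000)) 3)) := by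
  induction N with
  | zero =>
    rw [PySem.List.pyRange_one_eq_nil (by norm_num)]
    rfl
  | succ N ih =>
    have hsplit : PySem.List.pyRange 1 (((N + 1 : Nat) : Int) + 1) 1
        = PySem.List.pyRange 1 ((N : Int) + 1) 1 ++ [((N : Int) + 1)] := by
      push_cast
      exact PySem.List.pyRange_one_succ_right (by omega)
    rw [hsplit, List.foldl_append, List.map_append, ih]
    have hcast : ((N : Int) + 1) = (((N + 1 : Nat) : Nat) : Int) := by push_cast; ring
    have hstep : pvStepBuf (pvPad N) (PySem.Int.toChars (((N + 1 : Nat) : Int))) = pvPad (N + 1) := by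
      have := pv_step_pad (N + 1) (by omega)
      simpa using this
    simp only [List.foldl_cons, List.foldl_nil, List.map_cons, List.map_nil]
    rw [hcast, hstep, pv_alt_elem _ (by push_cast; omega)]
    simp

-- ===== VERDICT (by name: the statement is the Claim_ definition above) =====
theorem partSuffixes_spec : Claim_equal_partSuffixes := by
  intro x _
  unfold Spec_partSuffixes partSuffixes partSuffixes_alt
  by_cases hx : x < 1
  · rw [PySem.List.pyRange_one_eq_nil (by omega)]
    rfl
  · have hN : x = ((x.toNat : Nat) : Int) := by omega
    rw [hN, pv_main x.toNat]
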